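-- pv_equiv track=rewrite | github.com/Lightblues/Leetcode | contest/d64.py | maxTwoEvents_0
-- ===== SOURCE A (Python) =====
-- from typing import List, Optional, Generator, Tuple, Literal
--
-- def maxTwoEvents_0(events: List[List[int]]) -> int:
--     l = []
--     for s,e,v in events:
--         l.append((s,0,v))
--         l.append((e,1,v))
--     l.sort()
--     bestEnd = 0
--     ans = 0
--     for time, type, value in l:
--         if type==0: # 由于 start 排在前面, 如有重复 s/e 此时 bestEnd 还是上一时刻的.
--             ans = max(ans, bestEnd+value)
--         else:
--             bestEnd = max(bestEnd, value)
--     return ans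
-- ===== SOURCE B (Python) =====
-- from typing import List
--
-- def maxTwoEvents_0(events: List[List[int]]) -> int:
--     # Direct quadratic scan: for each event, pair it with the best event
--     # that ends strictly before this one starts (or with nothing).
--     ans = 0
--     for s, e, v in events:
--         best = 0
--         for s2, e2, v2 in events:
--             if e2 < s:
--                 best = max(best, v2)
--         ans = max(ans, v + best)
--     return ans
-- ===== Notes on version B (the rewrite author's own statement) =====
-- stated objective: simpler
-- what changed: Replaces the sort-plus-event-sweep (start/end records, stable tuple sort, running best-end accumulator) with a direct nested scan: for each event, take its value plus the best value among events ending strictly before its start.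
import Mathlib
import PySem

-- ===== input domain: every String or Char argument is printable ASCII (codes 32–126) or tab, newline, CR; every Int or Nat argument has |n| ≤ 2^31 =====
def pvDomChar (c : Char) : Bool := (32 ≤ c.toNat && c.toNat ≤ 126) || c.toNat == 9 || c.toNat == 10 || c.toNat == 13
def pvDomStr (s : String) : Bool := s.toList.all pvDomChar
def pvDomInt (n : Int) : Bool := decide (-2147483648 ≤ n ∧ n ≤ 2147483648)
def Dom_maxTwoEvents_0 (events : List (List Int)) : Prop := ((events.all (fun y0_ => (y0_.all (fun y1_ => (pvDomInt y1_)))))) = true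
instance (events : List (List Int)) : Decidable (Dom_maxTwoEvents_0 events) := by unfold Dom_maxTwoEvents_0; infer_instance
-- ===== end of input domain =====

-- B replaces A's sort-and-sweep with a plain quadratic scan (for each event, its value
-- plus the best value among events ending strictly before its start); objective: simpler.


-- ===== PORT A =====
-- Python's tuple comparison (s, t, v) < (s', t', v'), lexicographic on Int triples.
def pvLex3lt (a b : Int × Int × Int) : Bool :=
  a.1 < b.1 || (a.1 == b.1 && (a.2.1 < b.2.1 || (a.2.1 == b.2.1 && a.2.2 < b.2.2)))

def maxTwoEvents_0 (events : List (List Int)) : Int :=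
  -- l = []; for s,e,v in events: l.append((s,0,v)); l.append((e,1,v))
  -- (an event that does not unpack into exactly three values raises ValueError: excluded by Pre_)
  let l := events.foldl (fun acc ev =>
    match ev with
    | [s, e, v] => acc ++ [(s, (0 : Int), v), (e, (1 : Int), v)]
    | _ => acc) []
  -- l.sort(): Python's stable sort with 3-tuple lexicographic comparison
  -- (= PySem.List.sorted's insertion-sort algorithm, cf. sorted_eq_foldl_insertBy, with the hand-written tuple key)
  let ls := l.foldl (fun acc x => PySem.List.insertBy pvLex3lt x acc) []
  -- bestEnd = 0; ans = 0; for time, type, value in l: …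
  let r := ls.foldl (fun (st : Int × Int) (x : Int × Int × Int) =>
    if x.2.1 == 0 then (st.1, max st.2 (st.1 + x.2.2))
    else (max st.1 x.2.2, st.2)) ((0 : Int), (0 : Int))
  r.2

-- ===== PORT B =====
-- 's, e, v = ev' (tuple unpack) is ported as a length guard plus positional reads,
-- to keep B's definition independent of A's match auxiliaries; under Pre_ the guard always holds.
def maxTwoEvents_0_alt (events : List (List Int)) : Int :=
  events.foldl (fun ans ev =>
    if ev.length == 3 then
      max ans (ev.getD 2 0 + events.foldl (fun b ev2 =>
        if ev2.length == 3 then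
          if ev2.getD 1 0 < ev.getD 0 0 then max b (ev2.getD 2 0) else b
        else b) 0)
    else ans) 0

-- ===== PRECONDITION & SPEC =====
-- Pre_ excludes exactly the inputs on which Python A raises ValueError:
-- an event that does not unpack as 's, e, v' (length ≠ 3).  B raises there too.
def Pre_maxTwoEvents_0 (events : List (List Int)) : Prop :=
  ∀ ev ∈ events, ev.length = 3

instance (events : List (List Int)) : Decidable (Pre_maxTwoEvents_0 events) := by
  unfold Pre_maxTwoEvents_0; infer_instance

def pvWitness_maxTwoEvents_0 : List (List Int) := [[1, 3, 2], [4, 5, 2], [2, 4, 3]]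

def Spec_maxTwoEvents_0 (events : List (List Int)) (out : Int) : Prop := out = maxTwoEvents_0_alt events
instance (events : List (List Int)) (out : Int) : Decidable (Spec_maxTwoEvents_0 events out) := by unfold Spec_maxTwoEvents_0; infer_instance

-- ===== CLAIM (what is proved, stated in full; the proofs are below) =====
def Claim_equal_maxTwoEvents_0 : Prop := ∀ (events : List (List Int)), Dom_maxTwoEvents_0 events → Pre_maxTwoEvents_0 events → Spec_maxTwoEvents_0 events (maxTwoEvents_0 events)

-- ===== LEMMAS AND PROOFS =====

-- Abbreviations for the proofs (not used by the ports).

-- the (time, type, value) record list A builds, over already-unpacked triples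
def pvBuild (es : List (Int × Int × Int)) : List (Int × Int × Int) :=
  es.flatMap (fun x => [(x.1, (0 : Int), x.2.2), (x.2.1, (1 : Int), x.2.2)])

def pvStepA (st : Int × Int) (x : Int × Int × Int) : Int × Int :=
  if x.2.1 == 0 then (st.1, max st.2 (st.1 + x.2.2)) else (max st.1 x.2.2, st.2)

def pvEBstep (t : Int) (acc : Int) (x : Int × Int × Int) : Int :=
  if x.2.1 = 1 ∧ x.1 < t then max acc x.2.2 else acc

-- best end-value (base b) among ends in L strictly before time t
def pvEndBest (t : Int) (L : List (Int × Int × Int)) (b : Int) : Int :=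
  L.foldl (pvEBstep t) b

def pvAnsStep (L : List (Int × Int × Int)) (b acc : Int) (x : Int × Int × Int) : Int :=
  if x.2.1 = 0 then max acc (x.2.2 + pvEndBest x.1 L b) else acc

-- the answer accumulator: fold over R, starts contribute value + best end before them in L
def pvAns (L R : List (Int × Int × Int)) (b a : Int) : Int :=
  R.foldl (pvAnsStep L b) a

def pvLe3 (a b : Int × Int × Int) : Prop := pvLex3lt b a = false

theorem pvLex3lt_iff (a b : Int × Int × Int) :
    pvLex3lt a b = true ↔ (a.1 < b.1 ∨ (a.1 = b.1 ∧ (a.2.1 < b.2.1 ∨ (a.2.1 = b.2.1 ∧ a.2.2 < b.2.2)))) := by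
  simp [pvLex3lt]

theorem pvLe3_iff (a b : Int × Int × Int) :
    pvLe3 a b ↔ ¬ (b.1 < a.1 ∨ (b.1 = a.1 ∧ (b.2.1 < a.2.1 ∨ (b.2.1 = a.2.1 ∧ b.2.2 < a.2.2)))) := by
  unfold pvLe3
  rw [← pvLex3lt_iff b a]
  simp

theorem pvLe3_trans {a b c : Int × Int × Int} (h1 : pvLe3 a b) (h2 : pvLe3 b c) : pvLe3 a c := by
  rw [pvLe3_iff] at *
  omega

theorem pvLt_le3 {a b : Int × Int × Int} (h : pvLex3lt a b = true) : pvLe3 a b := by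
  rw [pvLex3lt_iff] at h
  rw [pvLe3_iff]
  omega

theorem pvLt_le3_trans {a b c : Int × Int × Int} (h1 : pvLex3lt a b = true) (h2 : pvLe3 b c) : pvLe3 a c :=
  pvLe3_trans (pvLt_le3 h1) h2

-- insertion keeps the multiset
theorem perm_insertBy (x : Int × Int × Int) (ys : List (Int × Int × Int)) :
    (PySem.List.insertBy pvLex3lt x ys).Perm (x :: ys) := by
  induction ys with
  | nil => simp [PySem.List.insertBy]
  | cons y ys ih =>
    simp only [PySem.List.insertBy]
    split
    · exact List.Perm.refl _
    · exact (ih.cons y).trans (List.Perm.swap x y ys)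

theorem perm_sortFold (l acc : List (Int × Int × Int)) :
    (l.foldl (fun acc x => PySem.List.insertBy pvLex3lt x acc) acc).Perm (acc ++ l) := by
  induction l generalizing acc with
  | nil => simp
  | cons x l ih =>
    simp only [List.foldl_cons]
    refine (ih _).trans ?_
    refine (((perm_insertBy x acc).append_right l).trans ?_)
    exact List.perm_middle.symm

-- insertion keeps sortedness
theorem pairwise_insertBy (x : Int × Int × Int) (ys : List (Int × Int × Int))
    (h : ys.Pairwise pvLe3) : (PySem.List.insertBy pvLex3lt x ys).Pairwise pvLe3 := by
  induction ys with
  | nil => simp [PySem.List.insertBy]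
  | cons y ys ih =>
    simp only [PySem.List.insertBy]
    rcases List.pairwise_cons.mp h with ⟨hy, hys⟩
    split
    · rename_i hlt
      refine List.pairwise_cons.mpr ⟨?_, h⟩
      intro z hz
      rcases hz with _ | hz
      · exact pvLt_le3 hlt
      · exact pvLt_le3_trans hlt (hy _ (by assumption))
    · rename_i hnlt
      refine List.pairwise_cons.mpr ⟨?_, ih hys⟩
      intro z hz
      rcases (PySem.List.mem_insertBy pvLex3lt x z ys).mp hz with h | hz
      · subst h; simpa [pvLe3] using hnlt
      · exact hy _ hz

theorem pairwise_sortFold (l : List (Int × Int × Int)) :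
    (l.foldl (fun acc x => PySem.List.insertBy pvLex3lt x acc) []).Pairwise pvLe3 := by
  suffices h : ∀ acc, acc.Pairwise pvLe3 →
      (l.foldl (fun acc x => PySem.List.insertBy pvLex3lt x acc) acc).Pairwise pvLe3 by
    exact h [] (by simp)
  induction l with
  | nil => intro acc h; simpa using h
  | cons x l ih =>
    intro acc h
    exact ih _ (pairwise_insertBy x acc h)

-- pvEndBest congruence / computation lemmas
theorem endBest_cons_start (t : Int) (x : Int × Int × Int) (R : List (Int × Int × Int)) (b : Int)
    (hx : x.2.1 = 0) : pvEndBest t (x :: R) b = pvEndBest t R b := by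
  simp [pvEndBest, pvEBstep, hx]

theorem endBest_cons_end (t : Int) (x : Int × Int × Int) (R : List (Int × Int × Int)) (b : Int)
    (hx : x.2.1 = 1) (hlt : x.1 < t) : pvEndBest t (x :: R) b = pvEndBest t R (max b x.2.2) := by
  simp [pvEndBest, pvEBstep, hx, hlt]

theorem endBest_of_no_end (t : Int) (L : List (Int × Int × Int)) (b : Int)
    (h : ∀ x ∈ L, ¬ (x.2.1 = 1 ∧ x.1 < t)) : pvEndBest t L b = b := by
  induction L generalizing b with
  | nil => rfl
  | cons x L ih =>
    have hx := h x (by simp)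
    simp only [pvEndBest, List.foldl_cons, pvEBstep, if_neg hx]
    exact ih b (fun y hy => h y (List.mem_cons_of_mem _ hy))

theorem pvEBstep_rcomm (t : Int) (acc : Int) (x y : Int × Int × Int) :
    pvEBstep t (pvEBstep t acc x) y = pvEBstep t (pvEBstep t acc y) x := by
  unfold pvEBstep; split_ifs <;> omega

theorem endBest_perm (t : Int) {L L' : List (Int × Int × Int)} (h : L.Perm L') (b : Int) :
    pvEndBest t L b = pvEndBest t L' b := by
  unfold pvEndBest
  exact @List.Perm.foldl_eq _ _ _ _ _ ⟨pvEBstep_rcomm t⟩ h b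

-- pvAns congruence in the inner list / base
theorem ans_congr (L L' R : List (Int × Int × Int)) (b b' a : Int)
    (h : ∀ x ∈ R, x.2.1 = 0 → pvEndBest x.1 L b = pvEndBest x.1 L' b') :
    pvAns L R b a = pvAns L' R b' a := by
  unfold pvAns
  refine PySem.List.foldl_congr_mem R _ _ a ?_
  intro acc x hx
  by_cases h0 : x.2.1 = 0
  · simp [pvAnsStep, h0, h x hx h0]
  · simp [pvAnsStep, h0]

theorem pvAnsStep_rcomm (L : List (Int × Int × Int)) (b acc : Int) (x y : Int × Int × Int) :
    pvAnsStep L b (pvAnsStep L b acc x) y = pvAnsStep L b (pvAnsStep L b acc y) x := by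
  unfold pvAnsStep; split_ifs <;> omega

theorem ans_perm {L R R' : List (Int × Int × Int)} (h : R.Perm R') (b a : Int) :
    pvAns L R b a = pvAns L R' b a := by
  unfold pvAns
  exact @List.Perm.foldl_eq _ _ _ _ _ ⟨pvAnsStep_rcomm L b⟩ h a

-- ===== the sweep characterization =====
theorem sweep_char (L : List (Int × Int × Int)) (hs : L.Pairwise pvLe3)
    (hty : ∀ x ∈ L, x.2.1 = 0 ∨ x.2.1 = 1) :
    ∀ b a : Int, (L.foldl pvStepA (b, a)).2 = pvAns L L b a := by
  induction L with
  | nil => intro b a; rfl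
  | cons x R ih =>
    intro b a
    rcases List.pairwise_cons.mp hs with ⟨hall, hR⟩
    have htyR : ∀ y ∈ R, y.2.1 = 0 ∨ y.2.1 = 1 := fun y hy => hty y (List.mem_cons_of_mem _ hy)
    rcases hty x (by simp) with h0 | h1
    · -- head is a start
      have hstep : (x :: R).foldl pvStepA (b, a) = R.foldl pvStepA (b, max a (b + x.2.2)) := by
        simp [pvStepA, h0]
      have hEB : pvEndBest x.1 (x :: R) b = b := by
        refine endBest_of_no_end _ _ _ ?_
        intro y hy
        rcases hy with _ | hy
        · simp [h0]
        · rintro ⟨hy1, hylt⟩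
          have := (pvLe3_iff x y).mp (hall y (by assumption))
          rw [h0] at this
          omega
      have hhead : pvAns (x :: R) (x :: R) b a = pvAns (x :: R) R b (max a (x.2.2 + b)) := by
        simp [pvAns, pvAnsStep, h0, hEB]
      have hRR : pvAns (x :: R) R b (max a (x.2.2 + b)) = pvAns R R b (max a (x.2.2 + b)) := by
        refine ans_congr _ _ _ _ _ _ ?_
        intro y _ _
        exact endBest_cons_start _ _ _ _ h0
      rw [hstep, ih hR htyR, hhead, hRR]
      have hc : b + x.2.2 = x.2.2 + b := by omega
      rw [hc]
    · -- head is an end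
      have hstep : (x :: R).foldl pvStepA (b, a) = R.foldl pvStepA (max b x.2.2, a) := by
        have : ¬ ((x.2.1 == 0) = true) := by simp [h1]
        simp [pvStepA, this]
      have hlt : ∀ y ∈ R, y.2.1 = 0 → x.1 < y.1 := by
        intro y hy hy0
        have := (pvLe3_iff x y).mp (hall y hy)
        rw [h1, hy0] at this
        omega
      have hskip : pvAns (x :: R) (x :: R) b a = pvAns (x :: R) R b a := by
        simp [pvAns, pvAnsStep, h1]
      have hcong : pvAns (x :: R) R b a = pvAns R R (max b x.2.2) a := by
        refine ans_congr _ _ _ _ _ _ ?_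
        intro y hy hy0
        exact endBest_cons_end _ _ _ _ h1 (hlt y hy hy0)
      rw [hstep, ih hR htyR, hskip, hcong]

-- ===== relating the ports to the abstractions =====
def pvToTriple (ev : List Int) : Option (Int × Int × Int) :=
  match ev with
  | [s, e, v] => some (s, e, v)
  | _ => none

theorem buildA_eq (events : List (List Int)) (hpre : Pre_maxTwoEvents_0 events) (acc : List (Int × Int × Int)) :
    events.foldl (fun acc ev =>
      match ev with
      | [s, e, v] => acc ++ [(s, (0 : Int), v), (e, (1 : Int), v)]
      | _ => acc) acc = acc ++ pvBuild (events.filterMap pvToTriple) := by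
  induction events generalizing acc with
  | nil => simp [pvBuild]
  | cons ev rest ih =>
    have h3 : ev.length = 3 := hpre ev (by simp)
    match ev, h3 with
    | [s, e, v], _ =>
      have hpre' : Pre_maxTwoEvents_0 rest := fun y hy => hpre y (List.mem_cons_of_mem _ hy)
      simp only [List.foldl_cons]
      rw [ih hpre']
      simp [pvBuild, pvToTriple]

theorem types_build (es : List (Int × Int × Int)) :
    ∀ x ∈ pvBuild es, x.2.1 = 0 ∨ x.2.1 = 1 := by
  intro x hx
  simp only [pvBuild, List.mem_flatMap, List.mem_cons, List.not_mem_nil, or_false] at hx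
  rcases hx with ⟨y, _, h | h⟩ <;> subst h <;> simp

theorem foldl_filterMap' {f : Int → (Int × Int × Int) → Int} (l : List (List Int)) (b : Int) :
    (l.filterMap pvToTriple).foldl f b
      = l.foldl (fun acc ev => match pvToTriple ev with | some y => f acc y | none => acc) b := by
  induction l generalizing b with
  | nil => rfl
  | cons ev l ih => cases hev : pvToTriple ev <;> simp [hev, ih]

theorem endBest_build (es : List (Int × Int × Int)) (t b : Int) :
    pvEndBest t (pvBuild es) b
      = es.foldl (fun acc y => if y.2.1 < t then max acc y.2.2 else acc) b := by
  unfold pvBuild pvEndBest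
  rw [List.foldl_flatMap]
  refine PySem.List.foldl_congr_mem es _ _ b ?_
  intro acc y _
  by_cases h : y.2.1 < t <;> simp [pvEBstep, h]

theorem ans_build (es L : List (Int × Int × Int)) (b a : Int) :
    pvAns L (pvBuild es) b a
      = es.foldl (fun acc y => max acc (y.2.2 + pvEndBest y.1 L b)) a := by
  unfold pvBuild pvAns
  rw [List.foldl_flatMap]
  refine PySem.List.foldl_congr_mem es _ _ a ?_
  intro acc y _
  simp [pvAnsStep]

theorem innerB_eq (events : List (List Int)) (s b : Int) :
    events.foldl (fun b ev2 =>
      if ev2.length == 3 then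
        if ev2.getD 1 0 < s then max b (ev2.getD 2 0) else b
      else b) b
      = pvEndBest s (pvBuild (events.filterMap pvToTriple)) b := by
  rw [endBest_build, foldl_filterMap']
  refine PySem.List.foldl_congr_mem events _ _ b ?_
  intro acc ev _
  rcases ev with _ | ⟨a1, _ | ⟨a2, _ | ⟨a3, _ | ⟨a4, t⟩⟩⟩⟩ <;> rfl

theorem altB_eq (events : List (List Int)) :
    maxTwoEvents_0_alt events
      = (events.filterMap pvToTriple).foldl
          (fun acc y => max acc (y.2.2 + pvEndBest y.1 (pvBuild (events.filterMap pvToTriple)) 0)) 0 := by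
  unfold maxTwoEvents_0_alt
  rw [foldl_filterMap']
  refine PySem.List.foldl_congr_mem events _ _ 0 ?_
  intro acc ev _
  rcases ev with _ | ⟨a1, _ | ⟨a2, _ | ⟨a3, _ | ⟨a4, t⟩⟩⟩⟩ <;> try rfl
  show max acc (a3 + _) = _
  rw [innerB_eq]
  rfl

-- ===== VERDICT (by name: the statement is the Claim_ definition above) =====
theorem maxTwoEvents_0_spec : Claim_equal_maxTwoEvents_0 := by
  intro events _ hpre
  unfold Spec_maxTwoEvents_0 maxTwoEvents_0
  rw [buildA_eq events hpre []]
  simp only [List.nil_append]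
  set es := events.filterMap pvToTriple with hes
  set B := pvBuild es with hB
  set L := B.foldl (fun acc x => PySem.List.insertBy pvLex3lt x acc) [] with hL
  have hperm : L.Perm B := by simpa using perm_sortFold B []
  have hpw : L.Pairwise pvLe3 := pairwise_sortFold B
  have hty : ∀ x ∈ L, x.2.1 = 0 ∨ x.2.1 = 1 := fun x hx => types_build es x (hperm.mem_iff.mp hx)
  have hfold : (L.foldl (fun (st : Int × Int) (x : Int × Int × Int) =>
      if x.2.1 == 0 then (st.1, max st.2 (st.1 + x.2.2))
      else (max st.1 x.2.2, st.2)) ((0 : Int), (0 : Int))).2 = (L.foldl pvStepA ((0 : Int), (0 : Int))).2 := rfl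
  rw [hfold, sweep_char L hpw hty 0 0]
  have e1 : pvAns L L 0 0 = pvAns B L 0 0 :=
    ans_congr _ _ _ _ _ _ (fun x _ _ => endBest_perm x.1 hperm 0)
  have e2 : pvAns B L 0 0 = pvAns B B 0 0 := ans_perm hperm 0 0
  rw [e1, e2, hB, ans_build, altB_eq, ← hes]
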